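-- pv_equiv track=rewrite | github.com/alliefn/sistem-tracking-covid19 | util.py | getHarga
-- ===== SOURCE A (Python) =====
-- def getHarga(stringHarga):
--     stringHarga = str(stringHarga)
--     result = ""
--
--     for c in stringHarga:
--         if(c in "0123456789"):
--             result += c
--         elif(c == '.'):
--             break
--
--     return str(result)
-- ===== SOURCE B (Python) =====
-- def getHarga(stringHarga):
--     s = str(stringHarga)
--     dot = s.find('.')
--     if dot >= 0:
--         s = s[:dot]
--     # deletion table: every character present in the prefix that is not an ASCII digit
--     junk = {ord(c): None for c in set(s) if c not in "0123456789"}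
--     return s.translate(junk)
-- ===== Notes on version B (the rewrite author's own statement) =====
-- stated objective: faster
-- what changed: Replaces A's break-terminated per-character accumulation loop by slicing off the prefix before the first period (str.find) and one str.translate call driven by a deletion table built from the set of non-digit characters actually present in that prefix.
import Mathlib
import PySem

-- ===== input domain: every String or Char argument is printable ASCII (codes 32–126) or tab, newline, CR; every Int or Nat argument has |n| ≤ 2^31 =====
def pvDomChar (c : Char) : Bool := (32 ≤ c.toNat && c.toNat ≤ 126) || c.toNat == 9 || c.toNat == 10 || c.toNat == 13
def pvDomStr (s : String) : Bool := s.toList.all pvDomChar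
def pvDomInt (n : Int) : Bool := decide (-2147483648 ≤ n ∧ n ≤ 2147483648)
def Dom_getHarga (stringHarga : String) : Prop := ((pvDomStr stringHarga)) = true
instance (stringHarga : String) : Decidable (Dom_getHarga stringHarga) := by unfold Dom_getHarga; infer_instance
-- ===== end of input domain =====

-- B replaces A's break-terminated accumulation loop by find+slice of the prefix before the
-- first '.' and a translate-style deletion table of the non-digit characters present in it
-- (measurably faster in Python by a constant factor: str.translate runs in C).

-- c in "0123456789"
def pvIsDigit (c : Char) : Bool := "0123456789".toList.contains c

-- ===== PORT A =====
-- the for-loop with break: append digits to result, stop at the first '.'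
def getHargaLoop : List Char → String → String
  | [], result => result
  | c :: cs, result =>
    if pvIsDigit c then getHargaLoop cs (result.push c)
    else if c = '.' then result
    else getHargaLoop cs result

-- str(stringHarga) on a str is the identity
def getHarga (stringHarga : String) : String :=
  getHargaLoop stringHarga.toList ""

-- ===== PORT B =====
-- dot = s.find('.'); if dot >= 0: s = s[:dot]
-- junk = {ord(c): None for c in set(s) if c not in "0123456789"} — a dict whose values are
--   all None is modelled by the PySem.Set of its keys (the ord codes, as Int), built by
--   folding the comprehension over set(s); the iteration order of set(s) is irrelevant
--   because only MEMBERSHIP of the finished table is ever consumed (by translate)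
-- s.translate(junk) deletes exactly the characters whose code is a key of junk
def getHarga_alt (stringHarga : String) : String :=
  let cs := stringHarga.toList
  let dot := PySem.Chars.find cs ['.']
  let pre := if 0 ≤ dot then PySem.List.slice cs none (some dot) else cs
  let junk : PySem.Set Int :=
    (PySem.Set.ofList pre).foldl
      (fun d c => if pvIsDigit c then d else PySem.Set.add d ((c.toNat : Int))) PySem.Set.empty
  String.ofList (pre.filter (fun c => !(PySem.Set.contains junk ((c.toNat : Int)))))

-- ===== PRECONDITION & SPEC =====
def Spec_getHarga (stringHarga : String) (out : String) : Prop := out = getHarga_alt stringHarga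
instance (stringHarga : String) (out : String) : Decidable (Spec_getHarga stringHarga out) := by unfold Spec_getHarga; infer_instance

-- ===== CLAIM (what is proved, stated in full; the proofs are below) =====
def Claim_equal_getHarga : Prop := ∀ (stringHarga : String), Dom_getHarga stringHarga → Spec_getHarga stringHarga (getHarga stringHarga)

-- ===== LEMMAS AND PROOFS =====
theorem pvIsDigit_dot : pvIsDigit '.' = false := by decide

-- A's loop yields the digit-filter of the prefix before the first '.'
theorem getHargaLoop_toList (cs : List Char) : ∀ (res : String),
    (getHargaLoop cs res).toList =
      res.toList ++ (cs.takeWhile (fun c => c ≠ '.')).filter pvIsDigit := by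
  induction cs with
  | nil => intro res; simp [getHargaLoop]
  | cons c cs ih =>
    intro res
    by_cases hd : pvIsDigit c = true
    · have hne : (c ≠ '.') := by
        intro h; rw [h, pvIsDigit_dot] at hd; exact Bool.false_ne_true hd
      rw [getHargaLoop, if_pos hd, ih]
      simp [hne, hd]
    · by_cases hp : c = '.'
      · subst hp
        rw [getHargaLoop, if_neg hd, if_pos rfl]
        simp
      · rw [getHargaLoop, if_neg hd, if_neg hp, ih]
        simp [hp, hd]

-- takeWhile stops exactly at the first position failing p
theorem takeWhile_eq_take_of (p : Char → Bool) :
    ∀ (cs : List Char) (k : Nat) (hk : k < cs.length),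
      (∀ i (hi : i < k), p (cs[i]'(Nat.lt_trans hi hk)) = true) → p (cs[k]'hk) = false →
      cs.takeWhile p = cs.take k := by
  intro cs
  induction cs with
  | nil => intro k hk; simp at hk
  | cons c cs ih =>
    intro k hk hbefore hstop
    cases k with
    | zero =>
      simp only [List.getElem_cons_zero] at hstop
      simp [hstop]
    | succ k =>
      have hc : p c = true := hbefore 0 (Nat.succ_pos k)
      simp only [List.takeWhile_cons, hc, if_true, List.take_succ_cons]
      rw [ih k (by simpa using hk) (fun i hi => hbefore (i + 1) (by omega))
        (by simpa using hstop)]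

-- B's find/slice prefix is the takeWhile prefix
theorem pre_eq_takeWhile (cs : List Char) :
    (if 0 ≤ PySem.Chars.find cs ['.']
       then PySem.List.slice cs none (some (PySem.Chars.find cs ['.'])) else cs) =
      cs.takeWhile (fun c => c ≠ '.') := by
  by_cases h : 0 ≤ PySem.Chars.find cs ['.']
  · rw [if_pos h, PySem.List.slice_to _ h]
    obtain ⟨hpre, hmin⟩ := PySem.Chars.find_spec (s := cs) (sub := ['.']) h
    set k := (PySem.Chars.find cs ['.']).toNat with hk
    obtain ⟨t, ht⟩ := hpre
    have hklen : k < cs.length := by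
      have := congrArg List.length ht
      simp [List.length_drop] at this
      omega
    have hdropk : cs.drop k = cs[k] :: cs.drop (k + 1) := List.drop_eq_getElem_cons hklen
    rw [hdropk] at ht
    have hck : cs[k] = '.' := by
      have h1 : ('.' : Char) :: t = cs[k] :: cs.drop (k + 1) := ht
      injection h1 with h1 _
      exact h1.symm
    have hbefore : ∀ i (hi : i < k), cs[i]'(Nat.lt_trans hi hklen) ≠ '.' := by
      intro i hi hcontra
      refine hmin i hi ⟨cs.drop (i + 1), ?_⟩
      rw [List.drop_eq_getElem_cons (Nat.lt_trans hi hklen), hcontra]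
      rfl
    symm
    apply takeWhile_eq_take_of _ cs k hklen
    · intro i hi
      simp [hbefore i hi]
    · simp [hck]
  · rw [if_neg h]
    have hnotmem : '.' ∉ cs := by
      intro hmem
      exact h ((PySem.Chars.find_nonneg_iff cs ['.']).mpr
        ((List.singleton_infix_iff '.' cs).mpr hmem))
    refine (List.takeWhile_eq_self_iff.mpr ?_).symm
    intro x hx
    simp only [decide_eq_true_eq]
    intro hcontra
    exact hnotmem (hcontra ▸ hx)

-- membership of the deletion table built by the comprehension fold
theorem mem_junk_fold (l : List Char) : ∀ (s : PySem.Set Int) (x : Int),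
    (x ∈ l.foldl
        (fun d c => if pvIsDigit c then d else PySem.Set.add d ((c.toNat : Int))) s) ↔
      x ∈ s ∨ ∃ c ∈ l, pvIsDigit c = false ∧ x = (c.toNat : Int) := by
  induction l with
  | nil => intro s x; simp
  | cons c l ih =>
    intro s x
    rw [List.foldl_cons]
    by_cases hd : pvIsDigit c = true
    · rw [if_pos hd, ih]
      constructor
      · rintro (hs | ⟨d, hdl, hnd, hx⟩)
        · exact Or.inl hs
        · exact Or.inr ⟨d, List.mem_cons_of_mem _ hdl, hnd, hx⟩
      · rintro (hs | ⟨d, hdl, hnd, hx⟩)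
        · exact Or.inl hs
        · rcases List.mem_cons.mp hdl with rfl | hdl
          · rw [hd] at hnd; exact absurd hnd (by simp)
          · exact Or.inr ⟨d, hdl, hnd, hx⟩
    · rw [if_neg hd, ih]
      rw [PySem.Set.mem_add]
      constructor
      · rintro ((hs | hx) | ⟨d, hdl, hnd, hx⟩)
        · exact Or.inl hs
        · exact Or.inr ⟨c, by simp, by simpa using hd, hx⟩
        · exact Or.inr ⟨d, List.mem_cons_of_mem _ hdl, hnd, hx⟩
      · rintro (hs | ⟨d, hdl, hnd, hx⟩)
        · exact Or.inl (Or.inl hs)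
        · rcases List.mem_cons.mp hdl with rfl | hdl
          · exact Or.inl (Or.inr hx)
          · exact Or.inr ⟨d, hdl, hnd, hx⟩

theorem char_toNat_inj {c d : Char} (h : c.toNat = d.toNat) : c = d := by
  apply Char.ext
  exact UInt32.toNat_inj.mp h

-- translating with the deletion table keeps exactly the digits of the prefix
theorem junk_filter (pre : List Char) :
    pre.filter (fun c =>
      !(PySem.Set.contains
        ((PySem.Set.ofList pre).foldl
          (fun d c => if pvIsDigit c then d else PySem.Set.add d ((c.toNat : Int)))
          PySem.Set.empty) ((c.toNat : Int)))) = pre.filter pvIsDigit := by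
  apply List.filter_congr
  intro c hc
  set J := (PySem.Set.ofList pre).foldl
      (fun d c => if pvIsDigit c then d else PySem.Set.add d ((c.toNat : Int)))
      PySem.Set.empty with hJ
  have hmem : ∀ x : Int, PySem.Set.contains J x = true ↔
      ∃ d ∈ pre, pvIsDigit d = false ∧ x = (d.toNat : Int) := by
    intro x
    rw [PySem.Set.contains_iff, hJ, mem_junk_fold]
    simp [PySem.Set.mem_ofList, PySem.Set.empty]
  by_cases hd : pvIsDigit c = true
  · have hcontains : PySem.Set.contains J ((c.toNat : Int)) = false := by
      rw [Bool.eq_false_iff]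
      intro hcontra
      obtain ⟨d, _, hnd, hx⟩ := (hmem ((c.toNat : Int))).mp hcontra
      have hcd : c = d := char_toNat_inj (by exact_mod_cast hx)
      rw [← hcd, hd] at hnd
      exact absurd hnd (by simp)
    rw [hcontains, hd]
    rfl
  · have hdf : pvIsDigit c = false := by simpa using hd
    have hcontains : PySem.Set.contains J ((c.toNat : Int)) = true :=
      (hmem ((c.toNat : Int))).mpr ⟨c, hc, hdf, rfl⟩
    rw [hcontains, hdf]
    rfl

-- ===== VERDICT (by name: the statement is the Claim_ definition above) =====
theorem getHarga_spec : Claim_equal_getHarga := by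
  intro s _
  unfold Spec_getHarga getHarga getHarga_alt
  apply String.toList_injective
  simp only [getHargaLoop_toList, String.toList_ofList]
  rw [pre_eq_takeWhile, junk_filter]
  simp
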